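-- pv_equiv track=rewrite | github.com/L1ghtDream/AdventOfCode-2023 | day7/solution.py | check_two_pair
-- ===== SOURCE A (Python) =====
-- def get_cards_freq(hand: str, joker: bool) -> dict[str, int]:
--     freq: dict[str, int] = {}
--
--     for card in hand:
--         if card == "J" and joker:
--             continue
--
--         if card in freq:
--             freq[card] += 1
--         else:
--             freq[card] = 1
--
--     return freq
--
-- def check_two_pair(hand: str, joker: bool) -> bool:
--     freq: dict[str, int] = get_cards_freq(hand, joker)
--
--     found_two: bool = False
--
--     for value in freq.values():
--         if value == 2:
--             if found_two:
--                 return True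
--             else:
--                 found_two = True
--
--     return False
-- ===== SOURCE B (Python) =====
-- def check_two_pair(hand: str, joker: bool) -> bool:
--     cards = sorted(c for c in hand if not (joker and c == "J"))
--     pairs = 0
--     while cards:
--         k = cards.count(cards[0])
--         if k == 2:
--             pairs += 1
--         cards = cards[k:]
--     return pairs >= 2
-- ===== Notes on version B (the rewrite author's own statement) =====
-- stated objective: alternative
-- what changed: B replaces A's frequency-dictionary pass (build dict, then scan its values for 2s with an early return) by sorting the joker-filtered characters and counting runs of length exactly 2 by run-length grouping on the sorted list.
import Mathlib
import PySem

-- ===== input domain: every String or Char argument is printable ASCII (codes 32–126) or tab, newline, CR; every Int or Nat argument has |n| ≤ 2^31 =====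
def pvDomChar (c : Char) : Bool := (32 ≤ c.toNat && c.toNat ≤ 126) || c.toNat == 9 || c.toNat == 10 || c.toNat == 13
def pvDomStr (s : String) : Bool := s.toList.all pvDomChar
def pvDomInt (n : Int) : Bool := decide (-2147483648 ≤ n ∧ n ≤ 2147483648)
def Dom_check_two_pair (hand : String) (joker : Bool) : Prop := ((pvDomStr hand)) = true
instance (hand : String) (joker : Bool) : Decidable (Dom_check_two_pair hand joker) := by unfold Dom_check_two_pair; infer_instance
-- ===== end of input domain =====

-- B replaces A's frequency dictionary by sort-then-run-length grouping (same cost class, different algorithm); return value only, no mutation.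

-- ===== PORT A =====
def get_cards_freq (hand : String) (joker : Bool) : PySem.Dict Char Int :=
  hand.toList.foldl (fun freq card =>
    if card == 'J' && joker then freq
    else if freq.contains card then freq.insert card (freq.getD card 0 + 1)
    else freq.insert card 1) PySem.Dict.empty

def aLoop : List Int → Bool → Bool
  | [], _ => false
  | v :: rest, found =>
    if v == 2 then (if found then true else aLoop rest true) else aLoop rest found

def check_two_pair (hand : String) (joker : Bool) : Bool :=
  aLoop (get_cards_freq hand joker).values false

-- ===== PORT B =====
def bLoop : List Char → Int → Int
  | [], pairs => pairs
  | c :: rest, pairs =>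
    let k := PySem.List.count (c :: rest) c
    bLoop (PySem.List.slice (c :: rest) (some (k : Int)) none)
          (if k == 2 then pairs + 1 else pairs)
  termination_by l _ => l.length
  decreasing_by
    rw [PySem.List.slice_from_natCast]
    simp [PySem.List.count_eq, List.count_cons_self]

def check_two_pair_alt (hand : String) (joker : Bool) : Bool :=
  let cards := PySem.List.sorted (hand.toList.filter (fun c => !(joker && c == 'J'))) (fun c => c)
  decide (bLoop cards 0 ≥ 2)

-- ===== PRECONDITION & SPEC =====
def Spec_check_two_pair (hand : String) (joker : Bool) (out : Bool) : Prop := out = check_two_pair_alt hand joker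
instance (hand : String) (joker : Bool) (out : Bool) : Decidable (Spec_check_two_pair hand joker out) := by unfold Spec_check_two_pair; infer_instance

-- ===== CLAIM (what is proved, stated in full; the proofs are below) =====
def Claim_equal_check_two_pair : Prop := ∀ (hand : String) (joker : Bool), Dom_check_two_pair hand joker → Spec_check_two_pair hand joker (check_two_pair hand joker)

-- ===== LEMMAS AND PROOFS =====

-- number of distinct characters of m occurring exactly twice
def pairsIn (m : List Char) : Nat := (m.toFinset.filter (fun c => m.count c = 2)).card

lemma pairsIn_perm {l₁ l₂ : List Char} (h : l₁.Perm l₂) : pairsIn l₁ = pairsIn l₂ := by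
  unfold pairsIn
  rw [List.toFinset_eq_of_perm _ _ h]
  congr 1
  apply Finset.filter_congr
  intro x _
  rw [h.count_eq]

lemma get_cards_freq_eq (hand : String) (joker : Bool) :
    get_cards_freq hand joker =
      PySem.Dict.counter (hand.toList.filter (fun c => !(c == 'J' && joker))) := by
  unfold get_cards_freq
  have hbody : hand.toList.foldl
      (fun freq card =>
        if card == 'J' && joker then freq
        else if freq.contains card then freq.insert card (freq.getD card 0 + 1)
        else freq.insert card 1) PySem.Dict.empty
      = hand.toList.foldl
      (fun freq card =>
        if (!(card == 'J' && joker)) = true then freq.insert card (freq.getD card 0 + 1)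
        else freq) (PySem.Dict.empty : PySem.Dict Char Int) := by
    apply PySem.List.foldl_congr_mem
    intro acc x _
    by_cases h : (x == 'J' && joker) = true
    · simp [h]
    · simp only [Bool.not_eq_true] at h
      by_cases hc : acc.contains x = true
      · simp [h, hc]
      · simp only [Bool.not_eq_true] at hc
        simp [h, hc, PySem.Dict.getD_of_not_contains acc 0 hc]
  refine hbody.trans ?_
  rw [PySem.List.foldl_if_eq_foldl_filter,
      PySem.Dict.foldl_insert_getD_add_one_eq_counter]

lemma aLoop_eq (l : List Int) (found : Bool) :
    aLoop l found = decide (2 ≤ l.count 2 + (cond found 1 0)) := by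
  induction l generalizing found with
  | nil => cases found <;> simp [aLoop]
  | cons v rest ih =>
    by_cases hv : v = 2
    · subst hv
      cases found
      · rw [show aLoop (2 :: rest) false = aLoop rest true from by simp [aLoop],
            ih, decide_eq_decide, List.count_cons_self]
        try simp only [Bool.cond_true, Bool.cond_false]
        try omega
      · rw [show aLoop (2 :: rest) true = true from by simp [aLoop],
            List.count_cons_self, eq_comm, decide_eq_true_iff]
        try simp only [Bool.cond_true]
        try omega
    · have hb : ((v == 2) = false) := by simp [hv]
      rw [show aLoop (v :: rest) found = aLoop rest found from by simp [aLoop, hb], ih]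
      simp [List.count_cons, hb]

lemma countP_set_eq_pairsIn (fl : List Char) :
    (PySem.Set.ofList fl).countP (fun k => decide (fl.count k = 2)) = pairsIn fl := by
  unfold pairsIn
  have hnd := PySem.Set.nodup_ofList fl
  rw [List.countP_eq_length_filter,
      ← List.toFinset_card_of_nodup (hnd.filter _), List.toFinset_filter]
  congr 1
  ext x
  simp [PySem.Set.mem_ofList]

lemma check_two_pair_eq (hand : String) (joker : Bool) :
    check_two_pair hand joker =
      decide (2 ≤ pairsIn (hand.toList.filter (fun c => !(c == 'J' && joker)))) := by
  unfold check_two_pair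
  rw [get_cards_freq_eq, aLoop_eq]
  set fl := hand.toList.filter (fun c => !(c == 'J' && joker)) with hfl
  have hv : (PySem.Dict.counter fl).values
      = (PySem.Set.ofList fl).map (fun k => ((fl.count k : Nat) : Int)) := by
    show ((PySem.Dict.counter fl).items).map (·.2) = _
    rw [PySem.Dict.items_counter, List.map_map]
    rfl
  rw [hv, List.count, List.countP_map]
  have hp : (List.countP ((fun x => x == 2) ∘ fun k => ((fl.count k : Nat) : Int)) (PySem.Set.ofList fl))
      = (PySem.Set.ofList fl).countP (fun k => decide (fl.count k = 2)) := by
    apply List.countP_congr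
    intro x _
    by_cases h : fl.count x = 2
    · simp [h]
    · simp [h]
      exact_mod_cast h
  rw [hp, countP_set_eq_pairsIn]
  simp

lemma pairsIn_decomp (s t : List Char) (c : Char) (k : Nat) (hk : 0 < k)
    (hs : s = List.replicate k c ++ t) (hct : c ∉ t) :
    pairsIn s = (if k = 2 then 1 else 0) + pairsIn t := by
  subst hs
  have hcount : ∀ x, (List.replicate k c ++ t).count x = (if x = c then k else 0) + t.count x := by
    intro x
    rw [List.count_append, List.count_replicate]
    by_cases h : x = c
    · simp [h]
    · simp [h, Ne.symm h]
  unfold pairsIn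
  rw [List.toFinset_append, List.toFinset_replicate_of_ne_zero (by omega), Finset.singleton_union]
  have hcnotin : c ∉ t.toFinset := by simp [hct]
  have htc : t.count c = 0 := List.count_eq_zero_of_not_mem hct
  rw [Finset.filter_insert]
  have hfc : ∀ x ∈ t.toFinset, ((List.replicate k c ++ t).count x = 2 ↔ t.count x = 2) := by
    intro x hx
    have hxc : x ≠ c := fun h => hcnotin (h ▸ hx)
    rw [hcount x]
    simp [hxc]
  rw [Finset.filter_congr hfc]
  have hcc : (List.replicate k c ++ t).count c = k := by rw [hcount c]; simp [htc]
  by_cases hk2 : k = 2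
  · rw [if_pos (by rw [hcc]; exact hk2), if_pos hk2,
        Finset.card_insert_of_notMem (fun h => hcnotin (Finset.mem_of_mem_filter c h))]
    omega
  · rw [if_neg (by rw [hcc]; exact hk2), if_neg hk2]
    simp

lemma sorted_head_decomp (c : Char) (rest : List Char)
    (hpw : (c :: rest).Pairwise (· ≤ ·)) :
    ∃ t : List Char, c :: rest = List.replicate ((c :: rest).count c) c ++ t ∧ c ∉ t ∧ t.Pairwise (· ≤ ·) := by
  set w := (c :: rest).takeWhile (· == c) with hw
  set t := (c :: rest).dropWhile (· == c) with ht0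
  have hsplit : w ++ t = c :: rest := List.takeWhile_append_dropWhile
  have hsub : t.Sublist (c :: rest) := by rw [ht0]; exact List.dropWhile_sublist _
  have hall : ∀ b ∈ w, b = c := by
    intro b hb
    rw [hw] at hb
    simpa using List.mem_takeWhile_imp hb
  have hrep : w = List.replicate w.length c := List.eq_replicate_of_mem hall
  have hct : c ∉ t := by
    intro hmem
    cases hdt : t with
    | nil => rw [hdt] at hmem; simp at hmem
    | cons d t' =>
      have hdw : (c :: rest).dropWhile (· == c) = d :: t' := by rw [← ht0]; exact hdt
      have hnn : (c :: rest).dropWhile (· == c) ≠ [] := by rw [hdw]; simp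
      have hhead := List.head_dropWhile_not (l := c :: rest) (p := (· == c)) hnn
      simp [hdw] at hhead
      have hdmem : d ∈ c :: rest := hsub.mem (hdt ▸ List.mem_cons_self)
      have hcd : c < d := by
        rcases List.mem_cons.mp hdmem with h | h
        · exact absurd h hhead
        · exact lt_of_le_of_ne (List.rel_of_pairwise_cons hpw h) (fun he => hhead (he.symm))
      have hpwt : (d :: t').Pairwise (· ≤ ·) := hdt ▸ hpw.sublist hsub
      rw [hdt] at hmem
      rcases List.mem_cons.mp hmem with h | h
      · exact absurd h.symm hhead
      · exact absurd (lt_of_lt_of_le hcd (List.rel_of_pairwise_cons hpwt h)) (lt_irrefl c)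
  have htc : t.count c = 0 := List.count_eq_zero_of_not_mem hct
  have hcnt : (c :: rest).count c = w.length := by
    rw [← hsplit, List.count_append, htc, Nat.add_zero]
    conv_lhs => rw [hrep]
    simp
  refine ⟨t, ?_, hct, hpw.sublist hsub⟩
  rw [hcnt, ← hrep]
  exact hsplit.symm

lemma bLoop_eq (n : Nat) : ∀ (s : List Char) (p : Int), s.length ≤ n →
    s.Pairwise (· ≤ ·) → bLoop s p = p + (pairsIn s : Int) := by
  induction n with
  | zero =>
    intro s p hlen _
    have : s = [] := List.length_eq_zero_iff.mp (Nat.le_zero.mp hlen)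
    subst this
    simp [bLoop, pairsIn]
  | succ n ih =>
    intro s p hlen hpw
    match s with
    | [] => simp [bLoop, pairsIn]
    | c :: rest =>
      obtain ⟨t, hsplit, hct, hpwt⟩ := sorted_head_decomp c rest hpw
      rw [List.count_cons_self] at hsplit
      rw [bLoop]
      simp only [PySem.List.count_eq, PySem.List.slice_from_natCast, List.count_cons_self]
      have hdrop : (c :: rest).drop (List.count c rest + 1) = t := by
        conv_lhs => rw [hsplit]
        simpa using List.drop_left (List.replicate (List.count c rest + 1) c) t
      have hlen' : t.length ≤ n := by
        have := congrArg List.length hsplit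
        simp only [List.length_cons, List.length_append, List.length_replicate] at this
        simp only [List.length_cons] at hlen
        omega
      rw [hdrop, ih t _ hlen' hpwt,
          pairsIn_decomp (c :: rest) t c (List.count c rest + 1) (by omega) hsplit hct]
      by_cases hk2 : List.count c rest + 1 = 2
      · rw [if_pos (by simp [hk2]), if_pos hk2]
        push_cast
        ring
      · rw [if_neg (by simp; omega), if_neg hk2]
        simp

-- ===== VERDICT (by name: the statement is the Claim_ definition above) =====
theorem check_two_pair_spec : Claim_equal_check_two_pair := by
  intro hand joker _
  unfold Spec_check_two_pair check_two_pair_alt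
  rw [check_two_pair_eq]
  show _ = decide (bLoop (PySem.List.sorted ((hand.toList.filter (fun c => !(joker && c == 'J')))) (fun c => c)) 0 ≥ 2)
  have hfilt : hand.toList.filter (fun c => !(joker && c == 'J'))
      = hand.toList.filter (fun c => !(c == 'J' && joker)) := by
    apply List.filter_congr; intro x _; rw [Bool.and_comm]
  rw [hfilt]
  set fl := hand.toList.filter (fun c => !(c == 'J' && joker)) with hfl
  have hperm := PySem.List.sorted_perm fl (fun c => c) false
  have hpw := PySem.List.sorted_pairwise fl (fun c => c)
  rw [bLoop_eq (PySem.List.sorted fl (fun c => c)).length _ 0 le_rfl hpw]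
  rw [pairsIn_perm hperm]
  simp
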